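-- pv_equiv track=rewrite | github.com/sVyu/Algorithm | BAEKJOON/all_problems/14K/14204.py | is_valid_row
-- ===== SOURCE A (Python) =====
-- def is_valid_row(zs, m):
--     appeared = [False]*m
--     quo = (zs[0]-1)//m
--
--     for z in zs:
--         if((quo != ((z-1)//m)) or (appeared[z%m])):
--             return False
--         appeared[z%m] = True
--     return True
-- ===== SOURCE B (Python) =====
-- def is_valid_row(zs, m):
--     ref = (zs[0] - 1) // m
--     if any((z - 1) // m != ref for z in zs):
--         return False
--     s = sorted(zs)
--     return all(s[i] < s[i + 1] for i in range(len(s) - 1))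
-- ===== Notes on version B (the rewrite author's own statement) =====
-- stated objective: alternative
-- what changed: Replaces A's single pass with a mutable boolean 'appeared' bucket array by a sort-based check: after verifying every (z-1)//m equals the first element's quotient, residues are distinct iff the values themselves are distinct, which B tests by sorting zs and checking adjacent elements strictly increase.
import Mathlib
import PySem

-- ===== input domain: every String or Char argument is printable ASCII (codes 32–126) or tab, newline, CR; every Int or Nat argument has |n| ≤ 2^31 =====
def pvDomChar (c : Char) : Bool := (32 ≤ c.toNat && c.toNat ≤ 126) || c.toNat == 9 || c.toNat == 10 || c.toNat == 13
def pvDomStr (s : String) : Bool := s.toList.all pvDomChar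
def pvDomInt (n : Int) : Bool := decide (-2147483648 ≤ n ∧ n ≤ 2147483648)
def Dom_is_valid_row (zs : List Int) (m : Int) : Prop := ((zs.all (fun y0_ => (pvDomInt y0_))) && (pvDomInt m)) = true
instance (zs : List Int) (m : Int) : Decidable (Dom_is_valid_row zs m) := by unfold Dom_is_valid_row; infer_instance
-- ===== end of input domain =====

-- B drops A's mutable boolean 'appeared' bucket array: after checking every quotient equals
-- the first element's, residues are distinct iff the values are, tested by sorting zs and
-- scanning adjacent pairs (alternative decomposition, not claimed faster).

-- ===== PORT A =====
-- loop 'for z in zs' with the mutable 'appeared' array; pyGetD/pySetD defaults are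
-- unreachable under Pre_ (0 < m keeps z % m a valid index)
def isValidRowGo (quo m : Int) (zs : List Int) (appeared : List Bool) : Bool :=
  match zs with
  | [] => true
  | z :: rest =>
    if (quo != PySem.Int.floordiv (z - 1) m)
        || PySem.List.pyGetD appeared (PySem.Int.mod z m) false then false
    else isValidRowGo quo m rest (PySem.List.pySetD appeared (PySem.Int.mod z m) true)

def is_valid_row (zs : List Int) (m : Int) : Bool :=
  let appeared := List.replicate m.toNat false
  match PySem.List.pyGet? zs 0 with
  | none => false  -- zs[0] raises IndexError: excluded by Pre_
  | some z0 => isValidRowGo (PySem.Int.floordiv (z0 - 1) m) m zs appeared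

-- ===== PORT B =====
def is_valid_row_alt (zs : List Int) (m : Int) : Bool :=
  match PySem.List.pyGet? zs 0 with
  | none => false  -- zs[0] raises IndexError: excluded by Pre_
  | some z0 =>
    let ref := PySem.Int.floordiv (z0 - 1) m
    if zs.any (fun z => PySem.Int.floordiv (z - 1) m != ref) then false
    else
      let s := PySem.List.sorted zs (fun x => x) false
      -- all(s[i] < s[i+1] for i in range(len(s)-1)); indices are in range, default unused
      (PySem.List.pyRange 0 ((s.length : Int) - 1) 1).all
        (fun i => PySem.List.pyGetD s i 0 < PySem.List.pyGetD s (i + 1) 0)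

-- ===== PRECONDITION & SPEC =====
-- A raises on exactly these excluded inputs: IndexError on zs = [] (zs[0]),
-- ZeroDivisionError on m = 0, IndexError on m < 0 ('appeared' is empty).
def Pre_is_valid_row (zs : List Int) (m : Int) : Prop := zs ≠ [] ∧ 0 < m
instance (zs : List Int) (m : Int) : Decidable (Pre_is_valid_row zs m) := by
  unfold Pre_is_valid_row; infer_instance
def pvWitness_is_valid_row : List Int × Int := ([4, 6], 3)

def Spec_is_valid_row (zs : List Int) (m : Int) (out : Bool) : Prop := out = is_valid_row_alt zs m
instance (zs : List Int) (m : Int) (out : Bool) : Decidable (Spec_is_valid_row zs m out) := by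
  unfold Spec_is_valid_row; infer_instance

-- ===== CLAIM (what is proved, stated in full; the proofs are below) =====
def Claim_equal_is_valid_row : Prop := ∀ (zs : List Int) (m : Int), Dom_is_valid_row zs m → Pre_is_valid_row zs m → Spec_is_valid_row zs m (is_valid_row zs m)

-- ===== LEMMAS AND PROOFS =====

-- the fresh 'appeared' array is all-False
theorem pyGetD_replicate_false (n : Nat) (i : Int) (hi : 0 ≤ i) :
    PySem.List.pyGetD (List.replicate n false) i false = false := by
  rw [PySem.List.pyGetD_of_nonneg _ _ hi]
  rcases Nat.lt_or_ge i.toNat n with h' | h'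
  · simp [List.getD, h']
  · simp [List.getD,
      List.getElem?_eq_none (show (List.replicate n false).length ≤ i.toNat by simpa using h')]

-- reading the updated 'appeared' at a residue: same residue, or the old value
theorem get_set_residue (appeared : List Bool) (m z w : Int) (hm : 0 < m)
    (hlen : appeared.length = m.toNat) :
    PySem.List.pyGetD (PySem.List.pySetD appeared (PySem.Int.mod z m) true)
      (PySem.Int.mod w m) false
    = if PySem.Int.mod w m = PySem.Int.mod z m then true
      else PySem.List.pyGetD appeared (PySem.Int.mod w m) false := by
  have hz0 := PySem.Int.mod_nonneg z hm
  have hzlt := PySem.Int.mod_lt z hm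
  have hw0 := PySem.Int.mod_nonneg w hm
  have hcz : PySem.Int.mod z m = ((PySem.Int.mod z m).toNat : Int) := by omega
  have hcw : PySem.Int.mod w m = ((PySem.Int.mod w m).toNat : Int) := by omega
  rw [hcz, hcw, PySem.List.pyGetD_pySetD_natCast appeared _ _ true false (by omega)]
  have : ((PySem.Int.mod w m).toNat = (PySem.Int.mod z m).toNat) ↔
      (((PySem.Int.mod w m).toNat : Int) = ((PySem.Int.mod z m).toNat : Int)) := by omega
  split_ifs with h1 h2 h2 <;> first | rfl | (exfalso; omega)

-- invariant of A's loop: true iff every quotient matches, no residue was already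
-- marked in 'appeared', and the residues of zs are pairwise distinct
theorem go_true_iff (quo m : Int) (hm : 0 < m) :
    ∀ (zs : List Int) (appeared : List Bool), appeared.length = m.toNat →
    (isValidRowGo quo m zs appeared = true ↔
      (∀ z ∈ zs, PySem.Int.floordiv (z - 1) m = quo ∧
         PySem.List.pyGetD appeared (PySem.Int.mod z m) false = false) ∧
      (zs.map (fun z => PySem.Int.mod z m)).Nodup) := by
  intro zs
  induction zs with
  | nil => intro appeared _; simp [isValidRowGo]
  | cons z rest ih =>
    intro appeared hlen
    rw [isValidRowGo]
    by_cases hq : PySem.Int.floordiv (z - 1) m = quo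
    case neg =>
      rw [if_pos (by simp [bne_iff_ne, Ne.symm hq])]
      constructor
      · intro h; exact absurd h (by simp)
      · rintro ⟨h, -⟩; exact absurd ((h z (by simp)).1) hq
    · by_cases hs : PySem.List.pyGetD appeared (PySem.Int.mod z m) false = true
      · simp only [hq, hs, bne_self_eq_false, Bool.false_or]
        constructor
        · intro h; exact absurd h (by simp)
        · rintro ⟨h, -⟩
          have := (h z (by simp)).2; rw [hs] at this; exact absurd this (by simp)
      · have hs' : PySem.List.pyGetD appeared (PySem.Int.mod z m) false = false := by
          simpa using hs
        simp only [hq, bne_self_eq_false, Bool.false_or, hs', Bool.false_eq_true, if_false]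
        rw [ih (PySem.List.pySetD appeared (PySem.Int.mod z m) true)
          (by rw [PySem.List.pySetD_of_nonneg _ _ (PySem.Int.mod_nonneg z hm)]; simpa using hlen)]
        simp only [List.mem_cons, List.map_cons, List.nodup_cons, List.mem_map]
        constructor
        · rintro ⟨h, hnd⟩
          refine ⟨?_, ?_, hnd⟩
          · rintro w (rfl | hw)
            · exact ⟨hq, hs'⟩
            · obtain ⟨h1, h2⟩ := h w hw
              rw [get_set_residue appeared m z w hm hlen] at h2
              by_cases he : PySem.Int.mod w m = PySem.Int.mod z m
              · rw [if_pos he] at h2; exact absurd h2 (by simp)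
              · rw [if_neg he] at h2; exact ⟨h1, h2⟩
          · rintro ⟨w, hw, he⟩
            obtain ⟨-, h2⟩ := h w hw
            rw [get_set_residue appeared m z w hm hlen, if_pos he] at h2
            exact absurd h2 (by simp)
        · rintro ⟨h, hne, hnd⟩
          refine ⟨?_, hnd⟩
          intro w hw
          rw [get_set_residue appeared m z w hm hlen,
            if_neg (fun he => hne ⟨w, hw, he⟩)]
          exact h w (Or.inr hw)

-- injectivity of z % m on a single block: if (z-1)//m = (w-1)//m then equal residues force z = w
theorem mod_inj_on_block (m z w ref : Int) (hm : 0 < m)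
    (hz : PySem.Int.floordiv (z - 1) m = ref) (hw : PySem.Int.floordiv (w - 1) m = ref)
    (h : PySem.Int.mod z m = PySem.Int.mod w m) : z = w := by
  rw [PySem.Int.floordiv_eq_iff_of_pos hm, add_mul, one_mul] at hz hw
  obtain ⟨hz1, hz2⟩ := hz
  obtain ⟨hw1, hw2⟩ := hw
  rw [PySem.Int.mod_eq_emod_of_pos hm, PySem.Int.mod_eq_emod_of_pos hm] at h
  have e1 := Int.emod_add_mul_ediv z m
  have e2 := Int.emod_add_mul_ediv w m
  rcases lt_trichotomy (z / m) (w / m) with hlt | heq | hgt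
  · have hmul : m * (z / m) + m ≤ m * (w / m) := by
      have := mul_le_mul_of_nonneg_left (show z / m + 1 ≤ w / m by omega) (le_of_lt hm)
      rw [mul_add, mul_one] at this
      exact this
    omega
  · rw [heq] at e1
    omega
  · have hmul : m * (w / m) + m ≤ m * (z / m) := by
      have := mul_le_mul_of_nonneg_left (show w / m + 1 ≤ z / m by omega) (le_of_lt hm)
      rw [mul_add, mul_one] at this
      exact this
    omega

-- B's adjacent scan over range(len(s)-1) is exactly Chain' (<)
theorem adj_all_iff_chain (s : List Int) :
    ((PySem.List.pyRange 0 ((s.length : Int) - 1) 1).all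
        (fun i => PySem.List.pyGetD s i 0 < PySem.List.pyGetD s (i + 1) 0) = true)
      ↔ List.IsChain (· < ·) s := by
  rw [List.isChain_iff_getElem]
  simp only [List.all_eq_true, decide_eq_true_eq]
  constructor
  · intro h i hi
    have hmem : (i : Int) ∈ PySem.List.pyRange 0 ((s.length : Int) - 1) 1 := by
      rw [PySem.List.mem_pyRange_one]; omega
    have hlt := h _ hmem
    rw [PySem.List.pyGetD_of_nonneg _ _ (by omega),
      PySem.List.pyGetD_of_nonneg _ _ (by omega),
      List.getD_eq_getElem _ _ (by omega), List.getD_eq_getElem _ _ (by omega)] at hlt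
    have h1 : ((i : Int)).toNat = i := by omega
    have h2 : ((i : Int) + 1).toNat = i + 1 := by omega
    simp only [h1, h2] at hlt
    exact hlt
  · intro h i hmem
    rw [PySem.List.mem_pyRange_one] at hmem
    have hlt : i.toNat + 1 < s.length := by omega
    have hstep := h i.toNat hlt
    rw [PySem.List.pyGetD_of_nonneg _ _ (by omega),
      PySem.List.pyGetD_of_nonneg _ _ (by omega),
      List.getD_eq_getElem _ _ (by omega), List.getD_eq_getElem _ _ (by omega)]
    have h2 : (i + 1).toNat = i.toNat + 1 := by omega
    simp only [h2]
    exact hstep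

-- on the sorted copy, adjacent strict increase says exactly that zs has no duplicates
theorem chain_sorted_iff_nodup (zs : List Int) :
    List.IsChain (· < ·) (PySem.List.sorted zs (fun x => x) false) ↔ zs.Nodup := by
  have hperm : (PySem.List.sorted zs (fun x => x) false).Perm zs :=
    PySem.List.sorted_perm zs _ _
  rw [List.isChain_iff_pairwise, ← hperm.nodup_iff]
  constructor
  · intro h; exact h.imp ne_of_lt
  · intro h
    have hle : (PySem.List.sorted zs (fun x => x) false).Pairwise (· ≤ ·) := by
      simpa using PySem.List.sorted_pairwise zs (fun x => x)
    exact (hle.and h).imp (fun ⟨h1, h2⟩ => lt_of_le_of_ne h1 h2)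

-- under equal quotients, distinctness of residues = distinctness of values
theorem nodup_map_mod_iff (zs : List Int) (m ref : Int) (hm : 0 < m)
    (hq : ∀ z ∈ zs, PySem.Int.floordiv (z - 1) m = ref) :
    (zs.map (fun z => PySem.Int.mod z m)).Nodup ↔ zs.Nodup := by
  constructor
  · exact List.Nodup.of_map _
  · intro h
    exact h.map_on (fun z hz w hw he =>
      mod_inj_on_block m z w ref hm (hq z hz) (hq w hw) he)

-- ===== VERDICT (by name: the statement is the Claim_ definition above) =====
theorem is_valid_row_spec : Claim_equal_is_valid_row := by
  unfold Claim_equal_is_valid_row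
  rintro zs m _ ⟨hne, hm⟩
  unfold Spec_is_valid_row
  obtain ⟨z0, tl, rfl⟩ : ∃ z0 tl, zs = z0 :: tl := by
    cases zs with | nil => exact absurd rfl hne | cons a b => exact ⟨a, b, rfl⟩
  have h0 : PySem.List.pyGet? (z0 :: tl) 0 = some z0 := by
    simp [PySem.List.pyGet?, PySem.List.pyIdx?]
  rw [is_valid_row, is_valid_row_alt, h0]
  simp only
  generalize href : PySem.Int.floordiv (z0 - 1) m = ref
  have hA := go_true_iff ref m hm (z0 :: tl) (List.replicate m.toNat false) (by simp)
  by_cases hq : ∀ z ∈ z0 :: tl, PySem.Int.floordiv (z - 1) m = ref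
  · have hcond : ((z0 :: tl).any fun z => PySem.Int.floordiv (z - 1) m != ref) = false := by
      rw [List.any_eq_false]
      intro z hz
      simpa [bne_iff_ne] using hq z hz
    rw [hcond]
    simp only [Bool.false_eq_true, if_false]
    rw [Bool.eq_iff_iff, hA, adj_all_iff_chain, chain_sorted_iff_nodup,
      ← nodup_map_mod_iff (z0 :: tl) m ref hm hq]
    constructor
    · rintro ⟨-, hnd⟩; exact hnd
    · intro hnd
      exact ⟨fun z hz => ⟨hq z hz, pyGetD_replicate_false _ _ (PySem.Int.mod_nonneg z hm)⟩, hnd⟩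
  · have hcond : ((z0 :: tl).any fun z => PySem.Int.floordiv (z - 1) m != ref) = true := by
      rw [List.any_eq_true]
      push_neg at hq
      obtain ⟨z, hz, hzq⟩ := hq
      exact ⟨z, hz, by simpa [bne_iff_ne] using hzq⟩
    rw [hcond, if_pos rfl, ← Bool.not_eq_true, hA]
    rintro ⟨h, -⟩
    exact hq (fun z hz => (h z hz).1)
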